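-- pv_equiv track=rewrite | github.com/MohammedHydr/information-retrieval-web-search | heaps_law_verification.py | compute_heap_data
-- ===== SOURCE A (Python) =====
-- def compute_heap_data(tokens, parts=20):
--     """ Split tokens into parts and compute cumulative tokens and unique terms. """
--     part_size = len(tokens) // parts
--     cumulative_tokens = []
--     cumulative_vocab = set()
--     token_counts = []
--     unique_term_counts = []
--
--     for i in range(parts):
--         part_tokens = tokens[i * part_size: (i + 1) * part_size]
--         cumulative_tokens.extend(part_tokens)
--         cumulative_vocab.update(part_tokens)
--         token_counts.append(len(cumulative_tokens))
--         unique_term_counts.append(len(cumulative_vocab))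
--
--     return token_counts, unique_term_counts
-- ===== SOURCE B (Python) =====
-- def compute_heap_data(tokens, parts=20):
--     """ Same data via a first-occurrence index map instead of growing a cumulative list/set. """
--     part_size = len(tokens) // parts
--     first = {}
--     for idx, tok in enumerate(tokens):
--         if tok not in first:
--             first[tok] = idx
--     firsts = list(first.values())  # increasing by construction
--     token_counts = [(i + 1) * part_size for i in range(parts)]
--     unique_term_counts = []
--     p = 0
--     for i in range(parts):
--         limit = (i + 1) * part_size
--         while p < len(firsts) and firsts[p] < limit:
--             p += 1
--         unique_term_counts.append(p)
--     return token_counts, unique_term_counts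
-- ===== Notes on version B (the rewrite author's own statement) =====
-- stated objective: alternative
-- what changed: Instead of growing a cumulative token list and vocabulary set part by part, B builds a token-to-first-occurrence-index map in one pass, computes token counts by the closed form (i+1)*part_size, and gets each unique-term count by advancing one pointer over the increasing first-occurrence indices up to each part boundary.
import Mathlib
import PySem

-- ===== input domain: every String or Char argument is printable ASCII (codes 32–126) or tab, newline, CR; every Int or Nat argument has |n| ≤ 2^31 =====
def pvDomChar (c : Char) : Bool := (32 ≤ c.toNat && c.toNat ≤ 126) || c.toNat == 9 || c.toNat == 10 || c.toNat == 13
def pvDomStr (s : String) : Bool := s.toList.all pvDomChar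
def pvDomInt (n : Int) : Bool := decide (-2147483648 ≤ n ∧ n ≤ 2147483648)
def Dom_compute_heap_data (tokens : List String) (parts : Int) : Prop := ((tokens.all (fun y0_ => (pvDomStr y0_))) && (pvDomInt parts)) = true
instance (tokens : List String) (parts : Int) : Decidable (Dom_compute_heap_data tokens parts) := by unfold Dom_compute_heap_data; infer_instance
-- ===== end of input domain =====

-- B replaces A's per-part cumulative list/set growth by a one-pass first-occurrence index map
-- plus per-part counting of first occurrences below each cut (objective: alternative, not faster).

-- ===== PORT A =====
-- loop state: (cumulative_tokens, cumulative_vocab, token_counts, unique_term_counts)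
def pvStepA (tokens : List String) (part_size : Int)
    (st : List String × PySem.Set String × List Int × List Int) (i : Int) :
    List String × PySem.Set String × List Int × List Int :=
  let part := PySem.List.slice tokens (some (i * part_size)) (some ((i + 1) * part_size))
  let cum := st.1 ++ part
  let vocab := PySem.Set.update st.2.1 part
  (cum, vocab, st.2.2.1 ++ [(cum.length : Int)], st.2.2.2 ++ [(vocab.length : Int)])

def compute_heap_data (tokens : List String) (parts : Int) : List Int × List Int :=
  let part_size := PySem.Int.floordiv (tokens.length : Int) parts
  let st := (PySem.List.pyRange 0 parts 1).foldl (pvStepA tokens part_size)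
      ([], PySem.Set.empty, [], [])
  (st.2.2.1, st.2.2.2)

-- ===== PORT B =====
-- dict-build step: 'if tok not in first: first[tok] = idx'
def pvStepB (d : PySem.Dict String Int) (p : Int × String) : PySem.Dict String Int :=
  if d.contains p.2 then d else d.insert p.2 p.1

-- 'while p < len(firsts) and firsts[p] < limit: p += 1' (pyGetD exact: read only when p < len)
def pvAdvance (firsts : List Int) (limit : Int) (p : Int) : Int :=
  if h : p < (firsts.length : Int) ∧ PySem.List.pyGetD firsts p 0 < limit then
    pvAdvance firsts limit (p + 1)
  else p
termination_by ((firsts.length : Int) - p).toNat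
decreasing_by omega

def compute_heap_data_alt (tokens : List String) (parts : Int) : List Int × List Int :=
  let part_size := PySem.Int.floordiv (tokens.length : Int) parts
  let first := (PySem.List.enumerate tokens 0).foldl pvStepB PySem.Dict.empty
  let firsts := first.values
  let token_counts := (PySem.List.pyRange 0 parts 1).map (fun i => (i + 1) * part_size)
  let st := (PySem.List.pyRange 0 parts 1).foldl
      (fun (st : Int × List Int) i =>
        let limit := (i + 1) * part_size
        let p := pvAdvance firsts limit st.1
        (p, st.2 ++ [p]))
      ((0 : Int), ([] : List Int))
  (token_counts, st.2)

-- ===== PRECONDITION & SPEC =====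
-- Pre_ excludes only parts = 0, where Python A raises ZeroDivisionError at len(tokens) // parts.
def Pre_compute_heap_data (tokens : List String) (parts : Int) : Prop := parts ≠ 0
instance (tokens : List String) (parts : Int) : Decidable (Pre_compute_heap_data tokens parts) := by
  unfold Pre_compute_heap_data; infer_instance

def pvWitness_compute_heap_data : List String × Int := (["a", "b", "a", "c"], 2)

def Spec_compute_heap_data (tokens : List String) (parts : Int) (out : List Int × List Int) : Prop :=
  out = compute_heap_data_alt tokens parts
instance (tokens : List String) (parts : Int) (out : List Int × List Int) :
    Decidable (Spec_compute_heap_data tokens parts out) := by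
  unfold Spec_compute_heap_data; infer_instance

-- ===== CLAIM (what is proved, stated in full; the proofs are below) =====
def Claim_equal_compute_heap_data : Prop := ∀ (tokens : List String) (parts : Int),
  Dom_compute_heap_data tokens parts → Pre_compute_heap_data tokens parts →
  Spec_compute_heap_data tokens parts (compute_heap_data tokens parts)

-- ===== LEMMAS AND PROOFS =====

-- j is a first-occurrence position of t iff t[j] does not occur earlier
def pvQ (t : List String) (j : Nat) : Bool := !((t.take j).contains (t.getD j ""))

-- the list of first-occurrence indices of t, in increasing order
def pvFirstIdx (t : List String) : List Int :=
  ((List.range t.length).filter (pvQ t)).map (fun j : Nat => (j : Int))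

lemma pvFirstIdx_snoc (l : List String) (x : String) :
    pvFirstIdx (l ++ [x]) = pvFirstIdx l ++ (if x ∈ l then [] else [((l.length : Nat) : Int)]) := by
  unfold pvFirstIdx
  have hlen : (l ++ [x]).length = l.length + 1 := by simp
  rw [hlen, List.range_succ, List.filter_append]
  have h1 : (List.range l.length).filter (pvQ (l ++ [x]))
      = (List.range l.length).filter (pvQ l) := by
    apply List.filter_congr
    intro j hj
    have hj' : j < l.length := List.mem_range.1 hj
    unfold pvQ
    rw [List.take_append_of_le_length (by omega), List.getD_append _ _ _ _ hj']
  have h2 : pvQ (l ++ [x]) l.length = !l.contains x := by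
    unfold pvQ
    rw [List.take_append_of_le_length (le_refl _)]
    simp [List.getD_eq_getElem?_getD]
  rw [h1]
  by_cases hx : x ∈ l
  · simp [h2, hx]
  · simp [h2, hx]

lemma pvSet_snoc {α : Type} [BEq α] (l : List α) (x : α) :
    PySem.Set.ofList (l ++ [x]) = PySem.Set.add (PySem.Set.ofList l) x := by
  rw [PySem.Set.ofList_eq_foldl, PySem.Set.ofList_eq_foldl, List.foldl_append]
  rfl

-- B's dict fold: values are the first-occurrence indices, keys the distinct tokens in order
lemma pvDict_spec (t : List String) :
    ((PySem.List.enumerate t 0).foldl pvStepB PySem.Dict.empty).values = pvFirstIdx t ∧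
    ((PySem.List.enumerate t 0).foldl pvStepB PySem.Dict.empty).keys = PySem.Set.ofList t := by
  induction t using List.reverseRecOn with
  | nil => exact ⟨by decide, by decide⟩
  | append_singleton l x ih =>
    obtain ⟨ihv, ihk⟩ := ih
    have henum : PySem.List.enumerate (l ++ [x]) 0
        = PySem.List.enumerate l 0 ++ [((l.length : Int), x)] := by
      rw [PySem.List.enumerate_append]
      simp [PySem.List.enumerate_cons, PySem.List.enumerate_nil]
    rw [henum, List.foldl_append]
    set D := (PySem.List.enumerate l 0).foldl pvStepB PySem.Dict.empty with hD
    have hcont : D.contains x = decide (x ∈ l) := by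
      rw [PySem.Dict.contains_eq_decide_mem_keys, ihk]
      simp [PySem.Set.mem_ofList]
    by_cases hx : x ∈ l
    · have hc : D.contains x = true := by simp [hcont, hx]
      simp only [List.foldl_cons, List.foldl_nil, pvStepB, hc]
      rw [if_pos trivial]
      constructor
      · rw [ihv, pvFirstIdx_snoc]; simp [hx]
      · rw [pvSet_snoc, ihk, PySem.Set.add, if_pos (by simp [hx])]
    · have hc : D.contains x = false := by simp [hcont, hx]
      simp only [List.foldl_cons, List.foldl_nil, pvStepB, hc]
      rw [if_neg (by simp)]
      have hitems := PySem.Dict.items_insert_of_not_contains (d := D) (k := x)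
        (v := (l.length : Int)) hc
      constructor
      · have : (D.insert x (l.length : Int)).values = D.values ++ [(l.length : Int)] := by
          simp [PySem.Dict.values, hitems]
        rw [this, ihv, pvFirstIdx_snoc]; simp [hx]
      · have : (D.insert x (l.length : Int)).keys = D.keys ++ [x] := by
          simp [PySem.Dict.keys, hitems]
        rw [this, ihk, pvSet_snoc, PySem.Set.add, if_neg (by simp [hx])]

lemma pvRangeFilterLt (n m : Nat) (h : m ≤ n) :
    (List.range n).filter (fun j => decide (j < m)) = List.range m := by
  induction n with
  | zero => have : m = 0 := by omega
            subst this; simp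
  | succ n ih =>
    rcases Nat.lt_or_ge m (n + 1) with h' | h'
    · rw [List.range_succ, List.filter_append, ih (by omega)]; simp; omega
    · have : m = n + 1 := by omega
      subst this; apply List.filter_eq_self.2; intro a ha; simp at ha ⊢; omega

lemma pvLenFilterCast (l : List Nat) (m : Nat) :
    ((l.map (fun j : Nat => (j : Int))).filter (fun d => decide (d < (m : Int)))).length
      = (l.filter (fun j => decide (j < m))).length := by
  induction l with
  | nil => simp
  | cons a l ih =>
    simp only [List.map_cons, List.filter_cons]
    by_cases h : a < m
    · rw [if_pos (by simpa using h), if_pos (by simpa using h)]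
      simp [ih]
    · rw [if_neg (by simpa using h), if_neg (by simpa using h)]
      exact ih

-- counting first occurrences below a cut = size of the vocabulary of that prefix
lemma pvCount_spec (t : List String) (m : Nat) (hm : m ≤ t.length) :
    ((pvFirstIdx t).filter (fun d => decide (d < (m : Int)))).length
      = (PySem.Set.ofList (t.take m)).length := by
  unfold pvFirstIdx
  rw [pvLenFilterCast, List.filter_comm, pvRangeFilterLt _ _ hm]
  induction m with
  | zero => simp [PySem.Set.ofList]
  | succ m ih =>
    have hmn : m < t.length := by omega
    have ihh := ih (by omega)
    rw [List.range_succ, List.filter_append]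
    have htake : t.take (m + 1) = t.take m ++ [t.getD m ""] := by
      rw [List.take_add_one]
      congr 1
      simp [List.getD_eq_getElem?_getD, List.getElem?_eq_getElem hmn, Option.toList]
    rw [htake, pvSet_snoc]
    unfold PySem.Set.add
    by_cases hq : pvQ t m = true
    · have hc : PySem.Set.contains (PySem.Set.ofList (t.take m)) (t.getD m "") = false := by
        unfold pvQ at hq
        rw [List.getD_eq_getElem?_getD] at hq
        simp at hq ⊢
        simpa using hq
      rw [if_neg (by simpa [List.getD_eq_getElem?_getD] using hc)]
      simp [hq, ihh]
    · have hq' : pvQ t m = false := by simpa using hq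
      have hc : PySem.Set.contains (PySem.Set.ofList (t.take m)) (t.getD m "") = true := by
        unfold pvQ at hq'
        rw [List.getD_eq_getElem?_getD] at hq'
        simp at hq' ⊢
        simpa using hq'
      rw [if_pos (by simpa [List.getD_eq_getElem?_getD] using hc)]
      simp [hq', ihh]

lemma pvSet_update {α : Type} [BEq α] (a b : List α) :
    PySem.Set.ofList (a ++ b) = PySem.Set.update (PySem.Set.ofList a) b := by
  rw [PySem.Set.ofList_eq_foldl, List.foldl_append, ← PySem.Set.ofList_eq_foldl]
  rfl

-- A's loop after k of the parts: the state is exactly the prefix of k*psN tokens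
lemma pvAfold (t : List String) (psN P : Nat) (hps : P * psN ≤ t.length) :
    ∀ k, k ≤ P →
    (((List.range k).map (fun j : Nat => (j : Int))).foldl (pvStepA t (psN : Int))
        ([], PySem.Set.empty, [], []))
      = (t.take (k * psN), PySem.Set.ofList (t.take (k * psN)),
         (List.range k).map (fun j : Nat => (((j + 1) * psN : Nat) : Int)),
         (List.range k).map
           (fun j : Nat => ((PySem.Set.ofList (t.take ((j + 1) * psN))).length : Int))) := by
  intro k hk
  induction k with
  | zero => simp [PySem.Set.empty, PySem.Set.ofList]
  | succ k ih =>
    rw [List.range_succ, List.map_append, List.map_append, List.map_append, List.foldl_append,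
        ih (by omega)]
    simp only [List.map_cons, List.map_nil, List.foldl_cons, List.foldl_nil]
    unfold pvStepA
    have hcast1 : (k : Int) * (psN : Int) = ((k * psN : Nat) : Int) := by push_cast; ring
    have hcast2 : ((k : Int) + 1) * (psN : Int) = ((k * psN : Nat) : Int) + (psN : Nat) := by
      push_cast; ring
    rw [hcast1, hcast2, PySem.List.slice_natCast_add]
    have hcum : t.take (k * psN) ++ (t.drop (k * psN)).take psN = t.take ((k + 1) * psN) := by
      rw [← List.take_add]
      congr 1
      ring
    have hlen : (t.take ((k + 1) * psN)).length = (k + 1) * psN := by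
      rw [List.length_take]
      have : (k + 1) * psN ≤ t.length := le_trans (Nat.mul_le_mul_right _ hk) hps
      omega
    simp only [← pvSet_update, hcum, hlen]


lemma pvSortedCount (fs : List Int) (hs : fs.Pairwise (· < ·)) (L : Int) :
    fs.countP (fun d => decide (d < L)) = (fs.takeWhile (fun d => decide (d < L))).length := by
  induction fs with
  | nil => simp
  | cons a fs ih =>
    rcases List.pairwise_cons.1 hs with ⟨ha, hfs⟩
    by_cases h : a < L
    · simp [h, ih hfs]
    · have hcount : fs.countP (fun d => decide (d < L)) = 0 := by
        apply List.countP_eq_zero.2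
        intro b hb
        have := ha b hb
        simp
        omega
      simp [h, hcount]

lemma pvAdvance_eq (fs : List Int) (hs : fs.Pairwise (· < ·)) (L : Int) (p : Nat)
    (hp : p ≤ fs.countP (fun d => decide (d < L))) :
    pvAdvance fs L (p : Int) = (fs.countP (fun d => decide (d < L)) : Int) := by
  have hcw : fs.countP (fun d => decide (d < L))
      = min (fs.findIdx (fun d => !(decide (d < L)))) fs.length := by
    rw [pvSortedCount fs hs L, List.takeWhile_eq_take_findIdx_not, List.length_take]
  set c := fs.countP (fun d => decide (d < L)) with hc
  clear_value c
  have hclen : c ≤ fs.length := by omega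
  have key : ∀ k p, p ≤ c → c - p = k → pvAdvance fs L (p : Int) = (c : Int) := by
    intro k
    induction k with
    | zero =>
      intro p hp hk
      have hpc : p = c := by omega
      rw [pvAdvance, dif_neg, hpc]
      rintro ⟨h1, h2⟩
      have hplen : p < fs.length := by exact_mod_cast h1
      rw [PySem.List.pyGetD_natCast, List.getD_eq_getElem?_getD,
          List.getElem?_eq_getElem hplen, Option.getD_some] at h2
      have hfi : c = fs.findIdx (fun d => !(decide (d < L))) := by omega
      have hfilt : fs.findIdx (fun d => !(decide (d < L))) < fs.length := by omega
      have hgc := List.findIdx_getElem (p := fun d => !(decide (d < L))) (xs := fs) (w := hfilt)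
      have hidx : fs[p] = fs[fs.findIdx (fun d => !(decide (d < L)))]'hfilt := by
        congr 1; omega
      simp only [hidx] at h2
      simp at hgc
      omega
    | succ k ih =>
      intro p hp hk
      have hpc : p < c := by omega
      have hplen : p < fs.length := by omega
      have hgetp : fs[p] < L := by
        have hfi : p < fs.findIdx (fun d => !(decide (d < L))) := by omega
        have := List.not_of_lt_findIdx hfi
        simpa using this
      rw [pvAdvance, dif_pos]
      · have h1 : (p : Int) + 1 = ((p + 1 : Nat) : Int) := by push_cast; ring
        rw [h1]
        exact ih (p + 1) (by omega) (by omega)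
      · refine ⟨by exact_mod_cast hplen, ?_⟩
        rw [PySem.List.pyGetD_natCast, List.getD_eq_getElem?_getD,
            List.getElem?_eq_getElem hplen, Option.getD_some]
        exact hgetp
  exact key (c - p) p hp rfl

lemma pvFirstIdx_sorted (t : List String) : (pvFirstIdx t).Pairwise (· < ·) := by
  unfold pvFirstIdx
  rw [List.pairwise_map]
  refine ((List.pairwise_lt_range).filter _).imp ?_
  intro a b h
  exact_mod_cast h

lemma pvFirstIdx_nonneg (t : List String) : ∀ d ∈ pvFirstIdx t, 0 ≤ d := by
  unfold pvFirstIdx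
  intro d hd
  rcases List.mem_map.1 hd with ⟨j, _, rfl⟩
  positivity

-- B's pointer loop produces the counts of first occurrences below each part boundary
lemma pvBfold (fs : List Int) (hs : fs.Pairwise (· < ·)) (hnn : ∀ d ∈ fs, 0 ≤ d) (psN : Nat) :
    ∀ k : Nat,
    (((List.range k).map (fun j : Nat => (j : Int))).foldl
        (fun (st : Int × List Int) i =>
          let limit := (i + 1) * (psN : Int)
          let p := pvAdvance fs limit st.1
          (p, st.2 ++ [p]))
        ((0 : Int), ([] : List Int)))
      = ((fs.countP (fun d => decide (d < ((k * psN : Nat) : Int))) : Int),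
         (List.range k).map
           (fun j : Nat => (fs.countP (fun d => decide (d < (((j + 1) * psN : Nat) : Int))) : Int))) := by
  have hzero : fs.countP (fun d => decide (d < ((0 : Nat) : Int))) = 0 := by
    apply List.countP_eq_zero.2
    intro d hd
    have := hnn d hd
    simp
    omega
  have hmono : ∀ m m' : Nat, m ≤ m' →
      fs.countP (fun d => decide (d < (m : Int))) ≤ fs.countP (fun d => decide (d < (m' : Int))) := by
    intro m m' hmm
    apply List.countP_mono_left
    intro d _ hd
    simp at hd ⊢
    omega
  intro k
  induction k with
  | zero =>
    have h0 : fs.countP (fun d => decide (d < (0 : Int))) = 0 := by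
      simpa using hzero
    simp [h0]
  | succ k ih =>
    rw [List.range_succ, List.map_append, List.foldl_append, ih]
    simp only [List.map_cons, List.map_nil, List.foldl_cons, List.foldl_nil]
    have hcast : ((k : Int) + 1) * (psN : Int) = (((k + 1) * psN : Nat) : Int) := by
      push_cast; ring
    have hadv : pvAdvance fs (((k : Int) + 1) * (psN : Int))
          ((fs.countP (fun d => decide (d < ((k * psN : Nat) : Int))) : Int))
        = (fs.countP (fun d => decide (d < (((k + 1) * psN : Nat) : Int))) : Int) := by
      rw [hcast]
      exact pvAdvance_eq fs hs _ _ (hmono _ _ (Nat.mul_le_mul_right _ (Nat.le_succ k)))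
    simp only [hadv, List.map_append, List.map_cons, List.map_nil]

-- ===== VERDICT (by name: the statement is the Claim_ definition above) =====
theorem compute_heap_data_spec : Claim_equal_compute_heap_data := by
  unfold Claim_equal_compute_heap_data
  intro t parts _ hpre
  unfold Spec_compute_heap_data compute_heap_data compute_heap_data_alt
  rcases lt_trichotomy parts 0 with hneg | hzero | hpos
  · rw [PySem.List.pyRange_one_eq_nil (by omega)]
    simp
  · exact absurd hzero hpre
  · -- parts > 0
    set P := parts.toNat with hP
    have hparts : parts = (P : Int) := by omega
    set n := t.length with hn
    have hfd : PySem.Int.floordiv (t.length : Int) parts = ((n / P : Nat) : Int) := by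
      rw [hparts, ← hn]
      exact_mod_cast PySem.Int.floordiv_natCast n P
    set psN := n / P with hpsN
    have hrange : PySem.List.pyRange 0 parts 1 = (List.range P).map (fun j : Nat => (j : Int)) := by
      rw [PySem.List.pyRange_one]
      simp [hparts]
    have hps : P * psN ≤ n := by
      rw [hpsN, Nat.mul_comm]
      exact Nat.div_mul_le_self n P
    rw [hfd, hrange]
    dsimp only
    rw [pvAfold t psN P hps P (le_refl P)]
    obtain ⟨hvals, _⟩ := pvDict_spec t
    rw [hvals, pvBfold (pvFirstIdx t) (pvFirstIdx_sorted t) (pvFirstIdx_nonneg t) psN P]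
    simp only [List.map_map]
    refine Prod.ext_iff.2 ⟨?_, ?_⟩ <;> dsimp only
    · apply List.map_congr_left
      intro j hj
      simp only [Function.comp_apply]
      push_cast
      ring
    · apply List.map_congr_left
      intro j hj
      have hjP : j < P := List.mem_range.1 hj
      have hmle : (j + 1) * psN ≤ n := le_trans (Nat.mul_le_mul_right _ hjP) hps
      rw [List.countP_eq_length_filter, pvCount_spec t _ hmle]
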